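-- pv_equiv track=rewrite | github.com/elinik0108/argument-builder-ABA | argument_builder.py | build_argument
-- ===== SOURCE A (Python) =====
-- from itertools import product
--
-- def build_argument(claim, assumptions, rules):
--     found = []
--
--     ## case 1: A claim that is a default assumption supports itself
--     if claim in assumptions:
--         found.append(((claim,), claim))
--
--     ## Otherwise look for rules that conclude this claim
--     for pol_claim, body in rules:
--         if pol_claim != claim:
--             continue
--
--         ## case 2
--         ## rule with empty body is fact
--         if not body:
--             found.append(((), claim))
--             continue
--
--         ## case 3
--         ## Recursive loop to find bodies that has arguments to back it up
--         sub_args_per_body = []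
--         for p in body:
--             sub_args_per_body.append(build_argument(p, assumptions, rules))
--
--         # If any body has no supporting argument, this rule can't fire
--         skip = False
--         for s in sub_args_per_body:
--             if len(s) == 0:
--                 skip = True
--                 break
--
--         if skip:
--             continue
--
--         ## Support of an argument is the combination of all sub-arguments that argument rely on
--         for combo in product(*sub_args_per_body):
--             combined_support = set()
--             for (sub_support, _) in combo:
--                 combined_support.update(sub_support)
--             found.append((tuple(sorted(combined_support)), claim))
--
--     ## Arguments with same support and claim are the same,
--     ## Removing duplicated arguments with same claim and support
--     unique = []
--     for arg in found:
--         if arg not in unique: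
--             unique.append(arg)
--     return unique
-- ===== SOURCE B (Python) =====
-- def build_argument(claim, assumptions, rules):
--     # Bottom-up dynamic programming instead of naive top-down recursion:
--     # collect the atoms reachable from the claim by a worklist BFS, then iterate
--     # a table atom -> arguments to a fixpoint (at most len(rules)+1 rounds are
--     # needed on the acyclic inputs A terminates on), so no subtree is ever
--     # recomputed; combos are folded incrementally as sets, dedup via a seen-set.
--     def targets(x):
--         out = []
--         for head, body in rules:
--             if head == x:
--                 out.extend(body)
--         return out
--
--     atoms = [claim]
--     i = 0
--     while i < len(atoms):
--         for p in targets(atoms[i]):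
--             if p not in atoms:
--                 atoms.append(p)
--         i += 1
--
--     def step(x, table):
--         found = []
--         if x in assumptions:
--             found.append(((x,), x))
--         for head, body in rules:
--             if head != x:
--                 continue
--             supports = [frozenset()]
--             for p in body:
--                 subs = table.get(p, [])
--                 supports = [s | frozenset(sub) for s in supports for (sub, _) in subs]
--             for s in supports:
--                 found.append((tuple(sorted(s)), x))
--         seen = set()
--         unique = []
--         for arg in found:
--             if arg not in seen:
--                 seen.add(arg)
--                 unique.append(arg)
--         return unique
--
--     table = {}
--     for _ in range(len(rules) + 1):
--         new = {x: step(x, table) for x in atoms}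
--         if new == table:
--             break
--         table = new
--     return table[claim]
-- ===== Notes on version B (the rewrite author's own statement) =====
-- stated objective: alternative
-- what changed: B replaces A's naive top-down recursion (which recomputes every shared subtree and takes itertools.product of sub-argument tuples) by bottom-up dynamic programming: a worklist BFS collects the atoms reachable from the claim, then an atom->arguments table is iterated to a fixpoint (early break when a round changes nothing, at most len(rules)+1 rounds), so each atom's arguments are computed once per round instead of once per tree occurrence; rule-body combinations are folded incrementally as sets and dedup uses a seen-set.
import Mathlib
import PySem

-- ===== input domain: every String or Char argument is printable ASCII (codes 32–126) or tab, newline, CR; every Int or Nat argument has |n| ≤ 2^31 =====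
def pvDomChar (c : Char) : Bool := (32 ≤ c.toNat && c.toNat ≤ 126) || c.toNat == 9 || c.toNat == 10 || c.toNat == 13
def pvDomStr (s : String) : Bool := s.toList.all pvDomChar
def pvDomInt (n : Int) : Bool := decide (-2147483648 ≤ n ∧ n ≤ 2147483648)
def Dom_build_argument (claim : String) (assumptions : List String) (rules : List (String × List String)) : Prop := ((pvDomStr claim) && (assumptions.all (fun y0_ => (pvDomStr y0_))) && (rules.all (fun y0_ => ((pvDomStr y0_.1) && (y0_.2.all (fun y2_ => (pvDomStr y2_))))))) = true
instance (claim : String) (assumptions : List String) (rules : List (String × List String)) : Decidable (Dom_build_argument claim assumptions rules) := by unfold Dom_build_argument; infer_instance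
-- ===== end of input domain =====

-- B replaces A's naive top-down recursion by bottom-up fixpoint iteration of an
-- atom→arguments table over the atoms BFS-reachable from the claim (no subtree
-- recomputed; early break when a round changes nothing), with an incremental
-- set-union fold for rule bodies and a seen-set dedup; return value only.

-- ===== PORT A =====
-- itertools.product over the sub-argument lists (first list varies slowest, exactly product's order)
def pvProduct (ls : List (List (List String × String))) : List (List (List String × String)) :=
  match ls with
  | [] => [[]]
  | l :: rest => l.flatMap (fun x => (pvProduct rest).map (fun c => x :: c))

-- recursion on fuel: Python A recurses unboundedly; Pre_ (acyclicity reachable from claim)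
-- guarantees depth ≤ rules.length + 1, so this fuel reproduces A wherever A returns
def pvBuildA (assumptions : List String) (rules : List (String × List String)) : Nat → String → List (List String × String)
  | 0, _ => []
  | f + 1, claim =>
    let found : List (List String × String) :=
      if assumptions.contains claim then [([claim], claim)] else []
    let found := rules.foldl (fun acc r =>
      if r.1 != claim then acc
      else if r.2.isEmpty then acc ++ [([], claim)]
      else
        let subArgs := r.2.map (fun p => pvBuildA assumptions rules f p)
        if subArgs.any (fun s => s.length == 0) then acc
        else acc ++ (pvProduct subArgs).map (fun combo =>
          (PySem.List.sorted (combo.foldl (fun st t => PySem.Set.update st t.1) PySem.Set.empty) (fun x => x) false, claim))) found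
    found.foldl (fun u arg => if u.contains arg then u else u ++ [arg]) []

def build_argument (claim : String) (assumptions : List String) (rules : List (String × List String)) : List (List String × String) :=
  pvBuildA assumptions rules (rules.length + 1) claim

-- ===== PORT B =====
-- targets(x): all body atoms of rules headed x (out.extend(body) = append)
def pvTargets (rules : List (String × List String)) (x : String) : List String :=
  rules.foldl (fun out r => if r.1 == x then out ++ r.2 else out) []

-- the worklist BFS 'while i < len(atoms)'; each iteration increments i and atoms
-- stays duplicate-free inside claim :: all body atoms, so this fuel always suffices
def pvBFS (rules : List (String × List String)) : Nat → List String → Nat → List String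
  | 0, atoms, _ => atoms
  | f + 1, atoms, i =>
    if i < atoms.length then
      pvBFS rules f (PySem.Set.update atoms (pvTargets rules (atoms.getD i ""))) (i + 1)
    else atoms

def pvAtoms (claim : String) (rules : List (String × List String)) : List String :=
  pvBFS rules ((rules.flatMap (fun r => r.2)).length + 2) [claim] 0

-- step(x, table): x's arguments given the previous round's table; 's | frozenset(sub)'
-- ported as Set.update (adds the new elements), exact because the set is consumed only
-- by sorted() with the identity key, which ignores insertion order
def pvStepB (assumptions : List String) (rules : List (String × List String))
    (table : PySem.Dict String (List (List String × String))) (x : String) : List (List String × String) :=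
  let found : List (List String × String) :=
    if assumptions.contains x then [([x], x)] else []
  let found := rules.foldl (fun acc r =>
    if r.1 != x then acc
    else
      let supports := r.2.foldl (fun sup p =>
          let subs := PySem.Dict.getD table p []
          sup.flatMap (fun s => subs.map (fun t => PySem.Set.update s t.1)))
        [PySem.Set.empty]
      acc ++ supports.map (fun s => (PySem.List.sorted s (fun y => y) false, x))) found
  (found.foldl (fun (st : List (List String × String) × PySem.Set (List String × String)) arg =>
      if PySem.Set.contains st.2 arg then st else (st.1 ++ [arg], PySem.Set.add st.2 arg))
    ([], PySem.Set.empty)).1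

-- one round: the dict comprehension {x: step(x, table) for x in atoms}
def pvRound (assumptions : List String) (rules : List (String × List String)) (atoms : List String)
    (table : PySem.Dict String (List (List String × String))) : PySem.Dict String (List (List String × String)) :=
  atoms.foldl (fun nt x => PySem.Dict.insert nt x (pvStepB assumptions rules table x)) PySem.Dict.empty

-- the round loop with the early fixpoint break 'if new == table: break'
def pvIterB (assumptions : List String) (rules : List (String × List String)) (atoms : List String) :
    Nat → PySem.Dict String (List (List String × String)) → PySem.Dict String (List (List String × String))
  | 0, t => t
  | k + 1, t =>
    let t' := pvRound assumptions rules atoms t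
    if t' = t then t else pvIterB assumptions rules atoms k t'

-- table[claim] after the rounds: claim ∈ atoms and at least one round runs,
-- so the key is present and getD [] is exact for Python's table[claim]
def build_argument_alt (claim : String) (assumptions : List String) (rules : List (String × List String)) : List (List String × String) :=
  PySem.Dict.getD (pvIterB assumptions rules (pvAtoms claim rules) (rules.length + 1) PySem.Dict.empty) claim []

-- ===== PRECONDITION & SPEC =====
-- the recursion graph: claim -> p whenever a rule (claim, body) has p in body
def pvStep (rules : List (String × List String)) (x : String) : List String :=
  rules.flatMap (fun r => if r.1 = x then r.2 else [])

-- nodes reachable from xs in at most n edge steps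
def pvReachSet (rules : List (String × List String)) : Nat → PySem.Set String → PySem.Set String
  | 0, xs => xs
  | n + 1, xs => pvReachSet rules n (PySem.Set.update xs (xs.flatMap (pvStep rules)))

-- Pre_ excludes exactly the inputs where Python A recurses forever (RecursionError):
-- no node reachable from claim lies on a cycle of the rule-dependency graph
def Pre_build_argument (claim : String) (assumptions : List String) (rules : List (String × List String)) : Prop :=
  ∀ x ∈ pvReachSet rules ((rules.flatMap (fun r => r.2)).length + 1) (PySem.Set.ofList [claim]),
    x ∉ pvReachSet rules ((rules.flatMap (fun r => r.2)).length + 1) (PySem.Set.ofList (pvStep rules x))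
instance (claim : String) (assumptions : List String) (rules : List (String × List String)) : Decidable (Pre_build_argument claim assumptions rules) := by unfold Pre_build_argument; infer_instance

def pvWitness_build_argument : String × List String × (List (String × List String)) :=
  ("q", ["p"], [("q", ["p"])])

def Spec_build_argument (claim : String) (assumptions : List String) (rules : List (String × List String)) (out : List (List String × String)) : Prop := out = build_argument_alt claim assumptions rules
instance (claim : String) (assumptions : List String) (rules : List (String × List String)) (out : List (List String × String)) : Decidable (Spec_build_argument claim assumptions rules out) := by unfold Spec_build_argument; infer_instance

-- ===== CLAIM (what is proved, stated in full; the proofs are below) =====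
def Claim_equal_build_argument : Prop := ∀ (claim : String) (assumptions : List String) (rules : List (String × List String)), Dom_build_argument claim assumptions rules → Pre_build_argument claim assumptions rules → Spec_build_argument claim assumptions rules (build_argument claim assumptions rules)

-- ===== LEMMAS AND PROOFS =====

-- seen-set dedup equals list-membership dedup (the seen set's list is the output list)
theorem pv_dedup_eq (found : List (List String × String)) :
    ∀ u : List (List String × String),
      (found.foldl (fun (st : List (List String × String) × PySem.Set (List String × String)) arg =>
          if PySem.Set.contains st.2 arg then st else (st.1 ++ [arg], PySem.Set.add st.2 arg)) (u, u)).1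
      = found.foldl (fun u arg => if u.contains arg then u else u ++ [arg]) u := by
  induction found with
  | nil => intro u; rfl
  | cons a t ih =>
    intro u
    simp only [List.foldl_cons]
    by_cases h : a ∈ u
    · rw [if_pos (by simpa using h), if_pos (by simpa using h)]
      exact ih u
    · rw [if_neg (by simpa using h), if_neg (by simpa using h),
        PySem.Set.add_of_not_mem h]
      exact ih (u ++ [a])

theorem pv_dedup_eq' (found : List (List String × String)) :
    (found.foldl (fun (st : List (List String × String) × PySem.Set (List String × String)) arg =>
        if PySem.Set.contains st.2 arg then st else (st.1 ++ [arg], PySem.Set.add st.2 arg))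
      ([], PySem.Set.empty)).1
    = found.foldl (fun u arg => if u.contains arg then u else u ++ [arg]) [] :=
  pv_dedup_eq found []

-- the incremental support fold computes the product-then-union of A, step for step
theorem pv_fold_product (Ls : List (List (List String × String))) :
    ∀ S : List (PySem.Set String),
      Ls.foldl (fun sup subs => sup.flatMap (fun s => subs.map (fun t => PySem.Set.update s t.1))) S
      = S.flatMap (fun s => (pvProduct Ls).map (fun combo => combo.foldl (fun st t => PySem.Set.update st t.1) s)) := by
  induction Ls with
  | nil => intro S; simp [pvProduct]
  | cons l rest ih =>
    intro S
    simp only [List.foldl_cons, ih, pvProduct]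
    simp [List.flatMap_assoc, List.flatMap_map, List.map_flatMap, Function.comp_def]

theorem pv_product_of_mem_nil (Ls : List (List (List String × String))) (h : [] ∈ Ls) :
    pvProduct Ls = [] := by
  induction Ls with
  | nil => cases h
  | cons l rest ih =>
    rcases List.mem_cons.mp h with h | h
    · simp [pvProduct, ← h]
    · simp [pvProduct, ih h]

-- pvTargets as a flatMap
theorem pv_targets_eq (rules : List (String × List String)) (x : String) :
    pvTargets rules x = rules.flatMap (fun r => if r.1 == x then r.2 else []) := by
  unfold pvTargets
  have h : ∀ (init : List String),
      rules.foldl (fun out r => if r.1 == x then out ++ r.2 else out) init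
        = init ++ rules.flatMap (fun r => if r.1 == x then r.2 else []) := by
    induction rules with
    | nil => intro init; simp
    | cons r rs ih =>
      intro init
      simp only [List.foldl_cons, List.flatMap_cons]
      by_cases hr : r.1 == x
      · rw [if_pos hr, if_pos hr, ih, List.append_assoc]
      · rw [if_neg hr, if_neg hr, ih]; simp
  simpa using h []

theorem pv_targets_sub (rules : List (String × List String)) (x p : String)
    (hp : p ∈ pvTargets rules x) : p ∈ rules.flatMap (fun r => r.2) := by
  rw [pv_targets_eq] at hp
  rcases List.mem_flatMap.mp hp with ⟨r, hr, hpr⟩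
  refine List.mem_flatMap.mpr ⟨r, hr, ?_⟩
  by_cases h : r.1 == x
  · simpa [h] using hpr
  · simp [h] at hpr

theorem pv_mem_targets (rules : List (String × List String)) (r : String × List String)
    (hr : r ∈ rules) (x p : String) (hx : r.1 = x) (hp : p ∈ r.2) : p ∈ pvTargets rules x := by
  rw [pv_targets_eq]
  exact List.mem_flatMap.mpr ⟨r, hr, by simp [hx, hp]⟩

-- a duplicate-free list is no longer than any list containing it
theorem pv_nodup_length_le (l l' : List String) (h : l.Nodup) (hs : l ⊆ l') :
    l.length ≤ l'.length := by
  calc l.length = l.toFinset.card := (List.toFinset_card_of_nodup h).symm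
    _ ≤ l'.toFinset.card := Finset.card_le_card (fun y hy =>
        List.mem_toFinset.mpr (hs (List.mem_toFinset.mp hy)))
    _ ≤ l'.length := List.toFinset_card_le l'

-- BFS only appends: the start is kept
theorem pv_bfs_subset (rules : List (String × List String)) :
    ∀ (f : Nat) (atoms : List String) (i : Nat), atoms ⊆ pvBFS rules f atoms i := by
  intro f
  induction f with
  | zero => intro atoms i; exact fun _ h => h
  | succ f ih =>
    intro atoms i
    simp only [pvBFS]
    split
    · intro y hy
      exact ih _ _ ((PySem.Set.mem_update _ _ _).mpr (Or.inl hy))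
    · exact fun _ h => h

-- transcription of the BFS invariant: with enough fuel the result is closed under pvTargets
theorem pv_bfs_closed (rules : List (String × List String)) (c : String) :
    ∀ (f : Nat) (atoms : List String) (i : Nat),
      atoms.Nodup →
      (∀ x ∈ atoms, x = c ∨ x ∈ rules.flatMap (fun r => r.2)) →
      (∀ j, j < i → ∀ p ∈ pvTargets rules (atoms.getD j ""), p ∈ atoms) →
      (rules.flatMap (fun r => r.2)).length + 2 ≤ f + i →
      ∀ x ∈ pvBFS rules f atoms i, ∀ p ∈ pvTargets rules x, p ∈ pvBFS rules f atoms i := by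
  intro f
  induction f with
  | zero =>
    intro atoms i hnd hsub hinv hfuel x hx p hp
    -- i ≥ atoms.length: every element has an index below i, so hinv closes atoms
    rw [show pvBFS rules 0 atoms i = atoms from rfl] at hx ⊢
    have hlen : atoms.length ≤ (rules.flatMap (fun r => r.2)).length + 1 := by
      have hss : atoms ⊆ c :: rules.flatMap (fun r => r.2) := by
        intro y hy
        rcases hsub y hy with h | h
        · exact h ▸ List.mem_cons_self
        · exact List.mem_cons_of_mem _ h
      simpa using pv_nodup_length_le atoms _ hnd hss
    rcases List.getElem_of_mem hx with ⟨j, hj, hxj⟩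
    have hji : j < i := by omega
    have : atoms.getD j "" = x := by rw [List.getD_eq_getElem _ _ hj, hxj]
    exact hinv j hji p (this ▸ hp)
  | succ f ih =>
    intro atoms i hnd hsub hinv hfuel x hx p hp
    simp only [pvBFS] at hx ⊢
    by_cases hi : i < atoms.length
    · rw [if_pos hi] at hx ⊢
      refine ih _ _ ?_ ?_ ?_ ?_ x hx p hp
      · exact PySem.Set.nodup_update _ _ hnd
      · intro y hy
        rcases (PySem.Set.mem_update _ _ _).mp hy with h | h
        · exact hsub y h
        · exact Or.inr (pv_targets_sub rules _ y h)
      · intro j hj q hq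
        have hpre : (PySem.Set.update atoms (pvTargets rules (atoms.getD i ""))).getD j ""
            = atoms.getD j "" := by
          rw [PySem.Set.update_eq_append_filter]
          have hjlen : j < atoms.length := by omega
          rw [PySem.Set.update_eq_append_filter] at *
          simp [List.getD_eq_getElem?_getD, List.getElem?_append_left hjlen]
        rw [hpre] at hq
        rcases Nat.lt_succ_iff_lt_or_eq.mp hj with hj' | hj'
        · exact (PySem.Set.mem_update _ _ _).mpr (Or.inl (hinv j hj' q hq))
        · subst hj'
          exact (PySem.Set.mem_update _ _ _).mpr (Or.inr hq)
      · omega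
    · rw [if_neg hi] at hx ⊢
      have hlen : atoms.length ≤ (rules.flatMap (fun r => r.2)).length + 1 := by
        have hss : atoms ⊆ c :: rules.flatMap (fun r => r.2) := by
          intro y hy
          rcases hsub y hy with h | h
          · exact h ▸ List.mem_cons_self
          · exact List.mem_cons_of_mem _ h
        simpa using pv_nodup_length_le atoms _ hnd hss
      rcases List.getElem_of_mem hx with ⟨j, hj, hxj⟩
      have hji : j < i := by omega
      have : atoms.getD j "" = x := by rw [List.getD_eq_getElem _ _ hj, hxj]
      exact hinv j hji p (this ▸ hp)

theorem pv_atoms_mem (claim : String) (rules : List (String × List String)) :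
    claim ∈ pvAtoms claim rules :=
  pv_bfs_subset rules _ [claim] 0 List.mem_cons_self

theorem pv_atoms_closed (claim : String) (rules : List (String × List String)) :
    ∀ x ∈ pvAtoms claim rules, ∀ p ∈ pvTargets rules x, p ∈ pvAtoms claim rules := by
  refine pv_bfs_closed rules claim _ [claim] 0 (by simp) (by simp) ?_ (by omega)
  intro j hj; omega

-- one step of B equals one fuel-unfolding of A when the table carries A's fuel-f values
-- at every atom x's targets
theorem pv_step_eq (assumptions : List String) (rules : List (String × List String))
    (table : PySem.Dict String (List (List String × String))) (f : Nat) (x : String)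
    (h : ∀ p ∈ pvTargets rules x, PySem.Dict.getD table p [] = pvBuildA assumptions rules f p) :
    pvStepB assumptions rules table x = pvBuildA assumptions rules (f + 1) x := by
  simp only [pvStepB, pvBuildA]
  rw [pv_dedup_eq']
  congr 1
  apply PySem.List.foldl_congr_mem
  intro acc r hr
  by_cases hm : r.1 != x
  · rw [if_pos hm, if_pos hm]
  · rw [if_neg hm, if_neg hm]
    have hx : r.1 = x := by
      have h' : (r.1 == x) = true := by simpa [bne] using hm
      exact eq_of_beq h'
    have hsub : ∀ p ∈ r.2, PySem.Dict.getD table p [] = pvBuildA assumptions rules f p := by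
      intro p hp
      exact h p (pv_mem_targets rules r hr x p hx hp)
    have h1 : r.2.foldl (fun sup p =>
          sup.flatMap (fun s => (PySem.Dict.getD table p []).map (fun t => PySem.Set.update s t.1)))
        [PySem.Set.empty]
        = (r.2.map (fun p => pvBuildA assumptions rules f p)).foldl
            (fun sup subs => sup.flatMap (fun s => subs.map (fun t => PySem.Set.update s t.1))) [PySem.Set.empty] := by
      rw [List.foldl_map]
      apply PySem.List.foldl_congr_mem
      intro sup p hp
      rw [hsub p hp]
    rw [h1, pv_fold_product]
    rcases hbody : r.2 with _ | ⟨p0, ps⟩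
    · simp [pvProduct, PySem.List.sorted, PySem.Set.empty]
    · simp only [List.isEmpty_cons, Bool.false_eq_true, if_false, List.flatMap_cons,
        List.flatMap_nil, List.append_nil, List.map_map]
      by_cases hskip : ((p0 :: ps).map (fun p => pvBuildA assumptions rules f p)).any (fun s => s.length == 0)
      · have hnil : [] ∈ (p0 :: ps).map (fun p => pvBuildA assumptions rules f p) := by
          rcases List.any_eq_true.mp hskip with ⟨s, hs, hlen⟩
          rcases List.length_eq_zero_iff.mp (by simpa using hlen) with rfl
          exact hs
        rw [if_pos hskip, pv_product_of_mem_nil _ hnil]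
        simp
      · rw [if_neg hskip]
        simp [Function.comp_def]

-- x not written by the fold: the dict's value at x survives
theorem pv_foldl_insert_skip (g : String → List (List String × String)) (ys : List String)
    (x : String) (hx : x ∉ ys) :
    ∀ (d' : PySem.Dict String (List (List String × String))),
      PySem.Dict.getD (ys.foldl (fun nt y => PySem.Dict.insert nt y (g y)) d') x []
        = PySem.Dict.getD d' x [] := by
  induction ys with
  | nil => intro d'; rfl
  | cons z zs ihz =>
    intro d'
    simp only [List.foldl_cons]
    rw [ihz (fun hz => hx (List.mem_cons_of_mem _ hz)), PySem.Dict.getD_insert]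
    rw [if_neg (fun (hxz : x = z) => hx (hxz ▸ List.mem_cons_self))]

-- a dict comprehension read back: getD at x ∈ atoms is g x (duplicates overwrite equal values)
theorem pv_round_getD (g : String → List (List String × String)) (atoms : List String) :
    ∀ (d : PySem.Dict String (List (List String × String))) (x : String), x ∈ atoms →
      PySem.Dict.getD (atoms.foldl (fun nt y => PySem.Dict.insert nt y (g y)) d) x [] = g x := by
  induction atoms with
  | nil => intro d x hx; cases hx
  | cons y ys ih =>
    intro d x hx
    simp only [List.foldl_cons]
    by_cases hmem : x ∈ ys
    · exact ih _ x hmem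
    · have hxy : x = y := by rcases List.mem_cons.mp hx with h | h; exact h; exact absurd h hmem
      subst hxy
      rw [pv_foldl_insert_skip g ys x hmem, PySem.Dict.getD_insert_self]

-- the plain (break-free) round iteration, for the proofs only
def pvIterP (assumptions : List String) (rules : List (String × List String)) (atoms : List String) :
    Nat → PySem.Dict String (List (List String × String)) → PySem.Dict String (List (List String × String))
  | 0, t => t
  | k + 1, t => pvRound assumptions rules atoms (pvIterP assumptions rules atoms k t)

theorem pv_iterP_fix (assumptions : List String) (rules : List (String × List String))
    (atoms : List String) (t : PySem.Dict String (List (List String × String)))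
    (h : pvRound assumptions rules atoms t = t) :
    ∀ k, pvIterP assumptions rules atoms k t = t := by
  intro k
  induction k with
  | zero => rfl
  | succ k ih => simp only [pvIterP, ih, h]

theorem pv_iterP_comm (assumptions : List String) (rules : List (String × List String))
    (atoms : List String) :
    ∀ (k : Nat) (t : PySem.Dict String (List (List String × String))),
      pvIterP assumptions rules atoms k (pvRound assumptions rules atoms t)
        = pvRound assumptions rules atoms (pvIterP assumptions rules atoms k t) := by
  intro k
  induction k with
  | zero => intro t; rfl
  | succ k ih => intro t; simp only [pvIterP, ih]

-- the early break changes nothing: breaking at a fixpoint equals iterating on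
theorem pv_iterB_eq_iterP (assumptions : List String) (rules : List (String × List String))
    (atoms : List String) :
    ∀ (k : Nat) (t : PySem.Dict String (List (List String × String))),
      pvIterB assumptions rules atoms k t = pvIterP assumptions rules atoms k t := by
  intro k
  induction k with
  | zero => intro t; rfl
  | succ k ih =>
    intro t
    simp only [pvIterB, pvIterP]
    by_cases hfix : pvRound assumptions rules atoms t = t
    · rw [if_pos hfix, pv_iterP_fix assumptions rules atoms t hfix, hfix]
    · rw [if_neg hfix, ih, pv_iterP_comm]

-- the iterated table carries exactly A's fuel-k values on every atom
theorem pv_iter_eq (claim : String) (assumptions : List String) (rules : List (String × List String)) :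
    ∀ (k : Nat) (x : String), x ∈ pvAtoms claim rules →
      PySem.Dict.getD (pvIterP assumptions rules (pvAtoms claim rules) k PySem.Dict.empty) x []
        = pvBuildA assumptions rules k x := by
  intro k
  induction k with
  | zero => intro x hx; simp [pvIterP, pvBuildA, PySem.Dict.getD_empty]
  | succ k ih =>
    intro x hx
    simp only [pvIterP, pvRound]
    rw [pv_round_getD _ _ _ x hx]
    exact pv_step_eq assumptions rules _ k x
      (fun p hp => ih p (pv_atoms_closed claim rules x hx p hp))

-- ===== VERDICT (by name: the statement is the Claim_ definition above) =====
theorem build_argument_spec : Claim_equal_build_argument := by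
  intro claim assumptions rules _ _
  show build_argument claim assumptions rules = build_argument_alt claim assumptions rules
  unfold build_argument build_argument_alt
  rw [pv_iterB_eq_iterP]
  exact (pv_iter_eq claim assumptions rules (rules.length + 1) claim (pv_atoms_mem claim rules)).symm
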